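-- pv_equiv track=rewrite | github.com/laurentdupin/pytorch | torch/_torchlite/passes/triton.py | _broadcast_index_expr
-- ===== SOURCE A (Python) =====
-- def _broadcast_index_expr(in_shape, out_shape, stride_order="contiguous"):
--     """Compute a Triton index expression to load a broadcast-compatible input.
--
--     Given an input tensor of shape ``in_shape`` that broadcasts to
--     ``out_shape``, returns ``(idx_expr, numel)`` where ``idx_expr`` is a
--     string expression over ``offs`` (the flat output index) that maps to
--     the correct element in the input, and ``numel`` is the number of
--     elements in the input (used for the load mask).
--
--     The approach works by decomposing the flat ``offs`` into per-dimension
--     output coordinates using divmod with output strides, then collapsing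
--     broadcast dimensions (size-1 in the input) and recomputing the flat
--     input index from the surviving coordinates.
--
--     When stride_order="channels_last" and shapes are 4D, the flat iteration
--     order is NHWC instead of NCHW, so offs decomposes using permuted
--     physical strides [N, H, W, C] rather than [N, C, H, W].
--     """
--     if stride_order == "channels_last" and len(out_shape) == 4:
--         perm = [0, 2, 3, 1]
--         out_shape = [out_shape[p] for p in perm]
--         if len(in_shape) == 4:
--             in_shape = [in_shape[p] for p in perm]
--
--     n_out = len(out_shape)
--     n_in = len(in_shape)
--     pad = n_out - n_in
--     padded_in = [1] * pad + list(in_shape)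
--
--     out_strides = [1] * n_out
--     for d in range(n_out - 2, -1, -1):
--         out_strides[d] = out_strides[d + 1] * out_shape[d + 1]
--
--     in_strides = [1] * n_out
--     for d in range(n_out - 2, -1, -1):
--         in_strides[d] = in_strides[d + 1] * padded_in[d + 1]
--
--     terms = []
--     for d in range(n_out):
--         if padded_in[d] == 1:
--             continue
--         coord = f"(offs // {out_strides[d]}) % {out_shape[d]}" if out_strides[d] > 1 else f"offs % {out_shape[d]}"
--         if in_strides[d] == 1:
--             terms.append(coord)
--         else:
--             terms.append(f"{coord} * {in_strides[d]}")
--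
--     numel = 1
--     for s in in_shape:
--         numel *= s
--
--     idx_expr = " + ".join(terms) if terms else "0"
--     return idx_expr, numel
-- ===== SOURCE B (Python) =====
-- def _broadcast_index_expr(in_shape, out_shape, stride_order="contiguous"):
--     """Single fused reverse pass with running stride products instead of
--     precomputing two stride arrays."""
--     if stride_order == "channels_last" and len(out_shape) == 4:
--         out_shape = [out_shape[0], out_shape[2], out_shape[3], out_shape[1]]
--         if len(in_shape) == 4:
--             in_shape = [in_shape[0], in_shape[2], in_shape[3], in_shape[1]]
--     n_out = len(out_shape)
--     padded_in = [1] * (n_out - len(in_shape)) + list(in_shape)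
--     rev_terms = []
--     run_out = run_in = 1
--     for p, o in reversed(list(zip(padded_in, out_shape))):
--         if p != 1:
--             coord = f"(offs // {run_out}) % {o}" if run_out > 1 else f"offs % {o}"
--             rev_terms.append(coord if run_in == 1 else f"{coord} * {run_in}")
--         run_out *= o
--         run_in *= p
--     numel = 1
--     for s in in_shape:
--         numel *= s
--     return (" + ".join(reversed(rev_terms)) if rev_terms else "0"), numel
-- ===== Notes on version B (the rewrite author's own statement) =====
-- stated objective: alternative
-- what changed: Replaces A's two separate stride-precompute loops plus a forward terms loop with a single reverse pass over the zipped (padded_in, out_shape) dims that maintains running output/input stride products and builds the terms back-to-front, reversing once at the end.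
import Mathlib
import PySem

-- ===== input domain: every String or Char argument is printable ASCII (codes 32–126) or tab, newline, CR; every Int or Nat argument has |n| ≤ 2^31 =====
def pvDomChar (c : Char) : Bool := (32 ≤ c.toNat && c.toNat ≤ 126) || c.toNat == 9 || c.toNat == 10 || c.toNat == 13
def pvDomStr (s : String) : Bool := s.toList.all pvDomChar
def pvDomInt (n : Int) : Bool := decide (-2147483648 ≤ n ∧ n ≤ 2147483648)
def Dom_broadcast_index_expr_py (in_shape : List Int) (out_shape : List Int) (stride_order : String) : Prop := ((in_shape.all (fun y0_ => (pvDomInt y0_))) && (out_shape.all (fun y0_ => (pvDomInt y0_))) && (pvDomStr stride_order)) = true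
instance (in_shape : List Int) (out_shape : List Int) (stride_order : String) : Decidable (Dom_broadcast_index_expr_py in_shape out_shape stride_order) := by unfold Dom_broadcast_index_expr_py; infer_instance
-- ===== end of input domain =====

-- B fuses A's two stride-precompute loops and the term loop into a single reverse
-- pass maintaining running stride products (objective: alternative decomposition).

-- ===== PORT A =====
-- A's channels_last permutation [shape[p] for p in [0,2,3,1]] (guarded by length == 4)
def pvPerm4A : List Int → List Int
  | [a, b, c, d] => [a, c, d, b]
  | l => l

-- A's backward stride loop strides[d] = strides[d+1] * shape[d+1]
def pvStrides : List Int → List Int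
  | [] => []
  | [_] => [1]
  | _ :: y :: t =>
      let s := pvStrides (y :: t)
      ((s.headD 1) * y) :: s

-- the terms loop: for d in range(n_out), skip padded_in[d] == 1
def pvTermsA : List Int → List Int → List Int → List Int → List String
  | p :: ps, o :: ost, so :: sos, si :: sis =>
      let rest := pvTermsA ps ost sos sis
      if p == 1 then rest
      else
        let coord := if so > 1 then "(offs // " ++ PySem.Int.toStr so ++ ") % " ++ PySem.Int.toStr o
                     else "offs % " ++ PySem.Int.toStr o
        (if si == 1 then coord else coord ++ " * " ++ PySem.Int.toStr si) :: rest
  | _, _, _, _ => []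

def broadcast_index_expr_py (in_shape : List Int) (out_shape : List Int) (stride_order : String) : String × Int :=
  let os := if stride_order == "channels_last" && out_shape.length == 4 then pvPerm4A out_shape else out_shape
  let ins := if stride_order == "channels_last" && out_shape.length == 4 && in_shape.length == 4 then pvPerm4A in_shape else in_shape
  let n_out := os.length
  let padded_in := List.replicate (n_out - ins.length) 1 ++ ins
  let out_strides := pvStrides os
  -- A's in_strides loop reads only padded_in[1..n_out-1]; .take n_out is exact
  let in_strides := pvStrides (padded_in.take n_out)
  let terms := pvTermsA padded_in os out_strides in_strides
  let numel := ins.foldl (· * ·) 1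
  ((if terms == [] then "0" else PySem.Str.join " + " terms), numel)

-- ===== PORT B =====
-- B's permutation written with explicit indexing [l[0], l[2], l[3], l[1]]; getD is exact under the length == 4 guard
def pvPerm4B (l : List Int) : List Int := [l.getD 0 0, l.getD 2 0, l.getD 3 0, l.getD 1 0]

-- B's single reverse loop with running products run_out, run_in, appending to rev_terms
def pvRevLoop : List (Int × Int) → Int → Int → List String → List String
  | [], _, _, acc => acc
  | (p, o) :: rest, ro, ri, acc =>
      let acc' := if p != 1 then
          let coord := if ro > 1 then "(offs // " ++ PySem.Int.toStr ro ++ ") % " ++ PySem.Int.toStr o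
                       else "offs % " ++ PySem.Int.toStr o
          acc ++ [if ri == 1 then coord else coord ++ " * " ++ PySem.Int.toStr ri]
        else acc
      pvRevLoop rest (ro * o) (ri * p) acc'

def broadcast_index_expr_py_alt (in_shape : List Int) (out_shape : List Int) (stride_order : String) : String × Int :=
  let os := if stride_order == "channels_last" && out_shape.length == 4 then pvPerm4B out_shape else out_shape
  let ins := if stride_order == "channels_last" && out_shape.length == 4 && in_shape.length == 4 then pvPerm4B in_shape else in_shape
  let padded_in := List.replicate (os.length - ins.length) 1 ++ ins
  let rev_terms := pvRevLoop ((padded_in.zip os).reverse) 1 1 []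
  let numel := ins.foldl (· * ·) 1
  ((if rev_terms == [] then "0" else PySem.Str.join " + " rev_terms.reverse), numel)

-- ===== PRECONDITION & SPEC =====
def Spec_broadcast_index_expr_py (in_shape : List Int) (out_shape : List Int) (stride_order : String) (out : String × Int) : Prop := out = broadcast_index_expr_py_alt in_shape out_shape stride_order
instance (in_shape : List Int) (out_shape : List Int) (stride_order : String) (out : String × Int) : Decidable (Spec_broadcast_index_expr_py in_shape out_shape stride_order out) := by unfold Spec_broadcast_index_expr_py; infer_instance

-- ===== CLAIM (what is proved, stated in full; the proofs are below) =====
def Claim_equal_broadcast_index_expr_py : Prop := ∀ (in_shape : List Int) (out_shape : List Int) (stride_order : String), Dom_broadcast_index_expr_py in_shape out_shape stride_order → Spec_broadcast_index_expr_py in_shape out_shape stride_order (broadcast_index_expr_py in_shape out_shape stride_order)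

-- ===== LEMMAS AND PROOFS =====

-- proof-side common form of the term string
def mkTerm (so o si : Int) : String :=
  let coord := if so > 1 then "(offs // " ++ PySem.Int.toStr so ++ ") % " ++ PySem.Int.toStr o
               else "offs % " ++ PySem.Int.toStr o
  if si == 1 then coord else coord ++ " * " ++ PySem.Int.toStr si

-- proof-side dim-by-dim recursion carrying tail multipliers ro ri
def tA : List Int → List Int → Int → Int → List String
  | p :: ps, o :: ost, ro, ri =>
      let rest := tA ps ost ro ri
      if p == 1 then rest
      else mkTerm (ost.prod * ro) o ((ps.take ost.length).prod * ri) :: rest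
  | _, _, _, _ => []

theorem pvStrides_cons (o : Int) (ost : List Int) :
    pvStrides (o :: ost) = ost.prod :: pvStrides ost := by
  induction ost generalizing o with
  | nil => simp [pvStrides]
  | cons y t ih =>
      simp [pvStrides] at ih ⊢
      rw [ih y]
      simp
      ring

theorem termsA_eq_tA (os pin : List Int) (h : os.length ≤ pin.length) :
    pvTermsA pin os (pvStrides os) (pvStrides (pin.take os.length)) = tA pin os 1 1 := by
  induction os generalizing pin with
  | nil => cases pin <;> simp [pvTermsA, tA]
  | cons o ost ih =>
      cases pin with
      | nil => simp at h
      | cons p ps =>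
          simp only [List.length_cons, Nat.add_le_add_iff_right] at h
          rw [pvStrides_cons, List.length_cons, List.take_succ_cons, pvStrides_cons]
          simp only [pvTermsA, tA, mkTerm, mul_one]
          rw [ih ps h]

theorem revLoop_snoc (r : List (Int × Int)) (p o ro ri : Int) (acc : List String) :
    pvRevLoop (r ++ [(p, o)]) ro ri acc
      = pvRevLoop r ro ri acc
        ++ (if p == 1 then []
            else [mkTerm (ro * (r.map Prod.snd).prod) o (ri * (r.map Prod.fst).prod)]) := by
  induction r generalizing ro ri acc with
  | nil =>
      simp only [List.nil_append, pvRevLoop, List.map_nil, List.prod_nil, mul_one, mkTerm]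
      by_cases hp : p = 1 <;> simp [hp, bne]
  | cons x r' ih =>
      obtain ⟨xp, xo⟩ := x
      simp only [List.cons_append, pvRevLoop]
      rw [ih]
      have e1 : ro * xo * (r'.map Prod.snd).prod = ro * (((xp, xo) :: r').map Prod.snd).prod := by
        simp [List.prod_cons]; ring
      have e2 : ri * xp * (r'.map Prod.fst).prod = ri * (((xp, xo) :: r').map Prod.fst).prod := by
        simp [List.prod_cons]; ring
      rw [e1, e2]

theorem map_snd_zip_prod (pin os : List Int) (h : os.length ≤ pin.length) :
    ((pin.zip os).map Prod.snd).prod = os.prod := by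
  induction os generalizing pin with
  | nil => simp
  | cons o ost ih =>
      cases pin with
      | nil => simp at h
      | cons p ps =>
          simp only [List.length_cons, Nat.add_le_add_iff_right] at h
          simp [List.zip_cons_cons, ih ps h]

theorem map_fst_zip_prod (pin os : List Int) :
    ((pin.zip os).map Prod.fst).prod = (pin.take os.length).prod := by
  induction os generalizing pin with
  | nil => simp
  | cons o ost ih =>
      cases pin with
      | nil => simp
      | cons p ps => simp [List.zip_cons_cons, ih ps]

theorem revLoop_eq_tA (os pin : List Int) (ro ri : Int) (h : os.length ≤ pin.length) :
    pvRevLoop ((pin.zip os).reverse) ro ri [] = (tA pin os ro ri).reverse := by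
  induction os generalizing pin ro ri with
  | nil => cases pin <;> simp [pvRevLoop, tA]
  | cons o ost ih =>
      cases pin with
      | nil => simp at h
      | cons p ps =>
          simp only [List.length_cons, Nat.add_le_add_iff_right] at h
          rw [List.zip_cons_cons, List.reverse_cons, revLoop_snoc, ih ps ro ri h]
          simp only [List.map_reverse, List.prod_reverse, map_snd_zip_prod ps ost h,
            map_fst_zip_prod ps ost]
          simp only [tA]
          by_cases hp : p = 1
          · simp [hp]
          · have e1 : ro * ost.prod = ost.prod * ro := by ring
            have e2 : ri * (List.take ost.length ps).prod = (List.take ost.length ps).prod * ri := by ring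
            simp [hp, List.reverse_cons, e1, e2]

theorem core_eq (ins os : List Int) :
    pvTermsA (List.replicate (os.length - ins.length) 1 ++ ins) os (pvStrides os)
        (pvStrides ((List.replicate (os.length - ins.length) 1 ++ ins).take os.length))
      = (pvRevLoop (((List.replicate (os.length - ins.length) 1 ++ ins).zip os).reverse) 1 1 []).reverse := by
  have hlen : os.length ≤ (List.replicate (os.length - ins.length) 1 ++ ins).length := by
    simp [List.length_append, List.length_replicate]
    omega
  rw [termsA_eq_tA os _ hlen, revLoop_eq_tA os _ 1 1 hlen, List.reverse_reverse]

-- ===== VERDICT (by name: the statement is the Claim_ definition above) =====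
theorem perm4_eq (l : List Int) (h : l.length = 4) : pvPerm4A l = pvPerm4B l := by
  rcases l with _ | ⟨a, _ | ⟨b, _ | ⟨c, _ | ⟨d, _ | ⟨e, t⟩⟩⟩⟩⟩ <;> simp_all [pvPerm4A, pvPerm4B]

theorem broadcast_index_expr_py_spec : Claim_equal_broadcast_index_expr_py := by
  intro in_shape out_shape stride_order _
  unfold Spec_broadcast_index_expr_py broadcast_index_expr_py broadcast_index_expr_py_alt
  by_cases h1 : (stride_order == "channels_last" && out_shape.length == 4) = true
  · have h4 : out_shape.length = 4 := by
      simp only [Bool.and_eq_true, beq_iff_eq] at h1; exact h1.2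
    have e1 : pvPerm4A out_shape = pvPerm4B out_shape := perm4_eq _ h4
    by_cases h2 : (in_shape.length == 4) = true
    · have h4i : in_shape.length = 4 := by simpa using h2
      have e2 : pvPerm4A in_shape = pvPerm4B in_shape := perm4_eq _ h4i
      simp only [h1, h2, Bool.and_true, if_true, e1, e2]
      rw [core_eq]
      simp
    · simp only [h1, h2, Bool.and_false, if_true, e1]
      rw [core_eq]
      simp
  · have hb : (stride_order == "channels_last" && out_shape.length == 4) = false := by
      simpa using h1
    simp only [hb, Bool.false_and, if_false]
    rw [core_eq]
    simp
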